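-- pv_equiv track=rewrite | github.com/sprzesmycki/telegram-bot | bot/services/piano/repertoire.py | format_pieces_list
-- ===== SOURCE A (Python) =====
-- _STATUS_EMOJI = {
--     "learning": "\U0001f4d6",       # 📖
--     "polishing": "\U0001f527",      # 🔧
--     "mastered": "\u2705",           # ✅
--     "needs_review": "\U0001f504",   # 🔄
-- }
--
-- def status_emoji(status: str) -> str:
--     return _STATUS_EMOJI.get(status, "\U0001f3b5")  # 🎵 fallback
--
-- def format_pieces_list(pieces: list[dict]) -> str:
--     if not pieces:
--         return "No pieces in your repertoire yet. Add one with /piano piece add <title>."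
--
--     by_status: dict[str, list[dict]] = {}
--     for p in pieces:
--         by_status.setdefault(p["status"], []).append(p)
--
--     lines: list[str] = ["Your repertoire:"]
--     for status in ("learning", "polishing", "needs_review", "mastered"):
--         group = by_status.get(status, [])
--         if not group:
--             continue
--         for piece in group:
--             composer = f" — {piece['composer']}" if piece.get("composer") else ""
--             lines.append(f"{status_emoji(status)} {piece['title']}{composer}")
--     return "\n".join(lines)
-- ===== SOURCE B (Python) =====
-- _STATUS_EMOJI = {
--     "learning": "\U0001f4d6",
--     "polishing": "\U0001f527",
--     "mastered": "\u2705",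
--     "needs_review": "\U0001f504",
-- }
--
-- def status_emoji(status: str) -> str:
--     return _STATUS_EMOJI.get(status, "\U0001f3b5")
--
-- def format_pieces_list(pieces: list[dict]) -> str:
--     if not pieces:
--         return "No pieces in your repertoire yet. Add one with /piano piece add <title>."
--     lines = ["Your repertoire:"] + [
--         f"{status_emoji(status)} {piece['title']}"
--         f"{' — ' + piece['composer'] if piece.get('composer') else ''}"
--         for status in ("learning", "polishing", "needs_review", "mastered")
--         for piece in pieces
--         if piece["status"] == status
--     ]
--     return "\n".join(lines)
-- ===== Notes on version B (the rewrite author's own statement) =====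
-- stated objective: simpler
-- what changed: B drops the intermediate by_status dict (setdefault/append grouping) and instead builds all lines in one comprehension that, for each status in the fixed tuple, scans the pieces list and keeps the pieces with that status.
import Mathlib
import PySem

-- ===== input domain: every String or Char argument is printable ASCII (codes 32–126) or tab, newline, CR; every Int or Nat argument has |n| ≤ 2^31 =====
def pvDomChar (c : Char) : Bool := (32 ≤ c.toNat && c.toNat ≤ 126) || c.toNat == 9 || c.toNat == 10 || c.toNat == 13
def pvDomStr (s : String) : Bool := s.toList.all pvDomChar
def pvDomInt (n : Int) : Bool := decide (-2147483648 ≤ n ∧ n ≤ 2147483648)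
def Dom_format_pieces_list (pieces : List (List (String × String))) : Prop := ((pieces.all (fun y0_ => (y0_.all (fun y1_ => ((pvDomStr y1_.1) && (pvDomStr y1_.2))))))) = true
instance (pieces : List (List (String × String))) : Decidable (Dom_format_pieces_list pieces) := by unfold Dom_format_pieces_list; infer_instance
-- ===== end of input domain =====

-- B replaces A's by_status grouping dict by one comprehension that scans the pieces per status in the fixed tuple; equal return values on Pre_ (simpler, not faster).

-- module-level helpers shared by both Pythons: the emoji table / status_emoji, and piece[k] lookup
def statusEmoji (status : String) : String :=
  (PySem.Dict.ofList [("learning", "📖"), ("polishing", "🔧"), ("mastered", "✅"), ("needs_review", "🔄")]).getD status "🎵"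

-- piece[k] on a dict represented as an assoc list; Pre_ makes "status"/"title" present (no KeyError)
-- and for "composer" the "" default is exactly Python's falsy piece.get("composer")
def pvGet (piece : List (String × String)) (k : String) : String :=
  (PySem.Dict.ofList piece).getD k ""

-- ===== PORT A =====
def format_pieces_list (pieces : List (List (String × String))) : String :=
  if pieces = [] then
    "No pieces in your repertoire yet. Add one with /piano piece add <title>."
  else
    let byStatus : PySem.Dict String (List (List (String × String))) :=
      pieces.foldl (fun d p => d.modify (pvGet p "status") [] (· ++ [p])) PySem.Dict.empty
    let lines : List String := ["Your repertoire:"]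
    let lines := ["learning", "polishing", "needs_review", "mastered"].foldl
      (fun lines status =>
        let group := byStatus.getD status []
        if group = [] then lines
        else lines ++ group.map (fun piece =>
          let composer := if pvGet piece "composer" ≠ "" then " — " ++ pvGet piece "composer" else ""
          statusEmoji status ++ " " ++ pvGet piece "title" ++ composer)) lines
    PySem.Str.join "\n" lines

-- ===== PORT B =====
def format_pieces_list_alt (pieces : List (List (String × String))) : String :=
  if pieces = [] then
    "No pieces in your repertoire yet. Add one with /piano piece add <title>."
  else
    PySem.Str.join "\n"
      ("Your repertoire:" ::
        ["learning", "polishing", "needs_review", "mastered"].flatMap (fun status =>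
          (pieces.filter (fun piece => pvGet piece "status" == status)).map (fun piece =>
            statusEmoji status ++ " " ++ pvGet piece "title" ++
              (if pvGet piece "composer" ≠ "" then " — " ++ pvGet piece "composer" else ""))))

-- ===== PRECONDITION & SPEC =====
-- Pre_ excludes exactly the inputs where A raises KeyError: a piece without a "status" key, or a
-- piece whose status is one of the four listed statuses but which has no "title" key.
def Pre_format_pieces_list (pieces : List (List (String × String))) : Prop :=
  ∀ p ∈ pieces, "status" ∈ p.map Prod.fst ∧
    (pvGet p "status" ∈ ["learning", "polishing", "needs_review", "mastered"] → "title" ∈ p.map Prod.fst)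
instance (pieces : List (List (String × String))) : Decidable (Pre_format_pieces_list pieces) := by unfold Pre_format_pieces_list; infer_instance

def pvWitness_format_pieces_list : (List (List (String × String))) :=
  [[("status", "learning"), ("title", "Nocturne"), ("composer", "Chopin")],
   [("status", "mastered"), ("title", "Etude"), ("composer", "")]]

def Spec_format_pieces_list (pieces : List (List (String × String))) (out : String) : Prop := out = format_pieces_list_alt pieces
instance (pieces : List (List (String × String))) (out : String) : Decidable (Spec_format_pieces_list pieces out) := by unfold Spec_format_pieces_list; infer_instance

-- ===== CLAIM (what is proved, stated in full; the proofs are below) =====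
def Claim_equal_format_pieces_list : Prop := ∀ (pieces : List (List (String × String))), Dom_format_pieces_list pieces → Pre_format_pieces_list pieces → Spec_format_pieces_list pieces (format_pieces_list pieces)

-- ===== LEMMAS AND PROOFS =====

-- A's grouping dict, looked up at a status, is exactly B's filtered scan of the pieces list
theorem group_eq (pieces : List (List (String × String))) (st : String) :
    (pieces.foldl (fun d p => d.modify (pvGet p "status") [] (· ++ [p]))
        (PySem.Dict.empty : PySem.Dict String (List (List (String × String))))).getD st []
      = pieces.filter (fun p => pvGet p "status" == st) := by
  have h : pieces.foldl (fun d p => d.modify (pvGet p "status") [] (· ++ [p]))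
        (PySem.Dict.empty : PySem.Dict String (List (List (String × String))))
      = (pieces.map (fun p => (pvGet p "status", p))).foldl
          (fun d q => d.modify q.1 [] (· ++ [q.2])) PySem.Dict.empty := by
    rw [List.foldl_map]
  rw [h, PySem.Dict.getD_foldl_modify_append]
  simp [List.filter_map, Function.comp_def]

-- the 'continue' on an empty group changes nothing: appending the empty map is a no-op
theorem skip_empty {α β : Type} (L : List β) (g : List α) (f : α → β) :
    (if g = [] then L else L ++ g.map f) = L ++ g.map f := by
  by_cases hg : g = [] <;> simp [hg]

-- ===== VERDICT (by name: the statement is the Claim_ definition above) =====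
theorem format_pieces_list_spec : Claim_equal_format_pieces_list := by
  intro pieces _ _
  unfold Spec_format_pieces_list format_pieces_list format_pieces_list_alt
  by_cases h : pieces = []
  · simp [h]
  · simp only [h, List.foldl, group_eq, skip_empty, List.flatMap]
    simp [List.append_assoc]
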